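-- pv_equiv track=rewrite | github.com/marslite/DSA-review | Week_1/coding_challenge.py | highest_scoring_students
-- ===== SOURCE A (Python) =====
-- def highest_scoring_students(input_dict: dict[str, int]) -> list[int]:
--   values = dict(sorted(input_dict.items(), key= lambda item:item[1], reverse=True))
--   final_list = []
--   max = 0
--   for name, value in values.items():
--     if value > max:
--       max = value;
--
--   for name, value in values.items():
--     if value == max:
--       final_list.append(name)
--
--   return final_list;
-- ===== SOURCE B (Python) =====
-- def highest_scoring_students(input_dict: dict[str, int]) -> list[int]:
--   best = 0
--   result = []
--   for name, value in input_dict.items():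
--     if value > best:
--       best = value
--       result = [name]
--     elif value == best:
--       result.append(name)
--   return result
-- ===== Notes on version B (the rewrite author's own statement) =====
-- stated objective: faster
-- what changed: Replaces A's sort of the whole dict plus two separate passes (max-finding, then collecting) by a single pass that threads a running best score and resets/extends the result list in place.
import Mathlib
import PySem

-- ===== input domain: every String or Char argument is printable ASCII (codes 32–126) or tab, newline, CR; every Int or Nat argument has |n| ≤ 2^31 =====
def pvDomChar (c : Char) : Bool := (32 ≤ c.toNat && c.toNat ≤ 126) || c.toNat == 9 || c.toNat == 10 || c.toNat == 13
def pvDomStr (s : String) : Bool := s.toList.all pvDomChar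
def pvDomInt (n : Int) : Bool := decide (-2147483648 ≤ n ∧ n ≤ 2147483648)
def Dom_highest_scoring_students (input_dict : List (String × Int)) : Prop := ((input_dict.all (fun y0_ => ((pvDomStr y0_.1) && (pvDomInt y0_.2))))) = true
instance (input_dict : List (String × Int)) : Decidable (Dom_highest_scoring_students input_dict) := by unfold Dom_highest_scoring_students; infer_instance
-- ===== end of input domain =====

-- B replaces A's value-sort plus two scans by one accumulator-threaded pass (O(n) instead of O(n log n)).

-- ===== PORT A =====
def highest_scoring_students (input_dict : List (String × Int)) : List String :=
  let values := (PySem.Dict.ofList (PySem.List.sorted input_dict (fun item => item.2) true)).items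
  let m := values.foldl (fun m p => if p.2 > m then p.2 else m) 0
  values.foldl (fun acc p => if p.2 == m then acc ++ [p.1] else acc) []

-- ===== PORT B =====
def highest_scoring_students_alt (input_dict : List (String × Int)) : List String :=
  (input_dict.foldl
    (fun s p =>
      if p.2 > s.1 then (p.2, [p.1])
      else if p.2 == s.1 then (s.1, s.2 ++ [p.1])
      else s)
    ((0 : Int), ([] : List String))).2

-- ===== PRECONDITION & SPEC =====
-- The Lean argument models a Python dict[str, int]; Pre_ only excludes association lists with
-- duplicate keys, which do not represent any Python dict (no input of A is excluded).
def Pre_highest_scoring_students (input_dict : List (String × Int)) : Prop :=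
  (input_dict.map Prod.fst).Nodup
instance (input_dict : List (String × Int)) : Decidable (Pre_highest_scoring_students input_dict) := by
  unfold Pre_highest_scoring_students; infer_instance

def pvWitness_highest_scoring_students : (List (String × Int)) :=
  [("alice", 3), ("bob", 5), ("carol", 5)]

def Spec_highest_scoring_students (input_dict : List (String × Int)) (out : List String) : Prop := out = highest_scoring_students_alt input_dict
instance (input_dict : List (String × Int)) (out : List String) : Decidable (Spec_highest_scoring_students input_dict out) := by unfold Spec_highest_scoring_students; infer_instance

-- ===== CLAIM (what is proved, stated in full; the proofs are below) =====
def Claim_equal_highest_scoring_students : Prop := ∀ (input_dict : List (String × Int)), Dom_highest_scoring_students input_dict → Pre_highest_scoring_students input_dict → Spec_highest_scoring_students input_dict (highest_scoring_students input_dict)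

-- ===== LEMMAS AND PROOFS =====

-- B's single pass returns the running max together with the names of the entries achieving it.
theorem alt_fold_char (xs : List (String × Int)) :
    ∀ (b : Int) (r : List String),
      xs.foldl
        (fun s p =>
          if p.2 > s.1 then (p.2, [p.1])
          else if p.2 == s.1 then (s.1, s.2 ++ [p.1])
          else s) (b, r)
      = (xs.foldl (fun m p => max m p.2) b,
         (if xs.foldl (fun m p => max m p.2) b = b then r else [])
           ++ (xs.filter (fun p => p.2 == xs.foldl (fun m p => max m p.2) b)).map Prod.fst) := by
  induction xs with
  | nil => intro b r; simp
  | cons p xs ih =>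
    intro b r
    have hle : max b p.2 ≤ xs.foldl (fun m q => max m q.2) (max b p.2) :=
      (PySem.List.le_foldl_max_int xs (fun q => q.2) (max b p.2)).1
    by_cases hv : p.2 > b
    · have hmax : max b p.2 = p.2 := by omega
      simp only [List.foldl_cons, if_pos hv, hmax]
      rw [ih]
      have hne : xs.foldl (fun m q => max m q.2) p.2 ≠ b := by
        rw [hmax] at hle; omega
      rw [if_neg hne]
      by_cases hM : p.2 = xs.foldl (fun m q => max m q.2) p.2
      · simp [← hM]
      · have : (p.2 == xs.foldl (fun m q => max m q.2) p.2) = false := by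
          simp [hM]
        rw [if_neg (fun hh => hM hh.symm)]
        simp [this]
    · have hmax : max b p.2 = b := by omega
      by_cases he : p.2 = b
      · have hbeq : (p.2 == b) = true := by simp [he]
        simp only [List.foldl_cons, if_neg hv, hbeq, if_true, hmax]
        rw [ih]
        by_cases hM : xs.foldl (fun m q => max m q.2) b = b
        · simp [hM]
          simp [he]
        · have : (p.2 == xs.foldl (fun m q => max m q.2) b) = false := by
            simp [he]; omega
          simp [this, hM]
      · have hbeq : (p.2 == b) = false := by simp [he]
        simp only [List.foldl_cons, if_neg hv, hbeq, Bool.false_eq_true, if_false, hmax]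
        rw [ih]
        have hlt : p.2 < b := by omega
        have : (p.2 == xs.foldl (fun m q => max m q.2) b) = false := by
          rw [hmax] at hle; simp; omega
        simp [this]

-- insertBy for a descending sort keeps the order of the maximal entries:
-- inserting below-the-max entries never passes an entry equal to the max.
theorem insertBy_filter_max (m : Int) (x : String × Int) :
    ∀ (ys : List (String × Int)),
      x.2 ≤ m → (∀ p ∈ ys, p.2 ≤ m) → ys.Pairwise (fun a b => b.2 ≤ a.2) →
      (PySem.List.insertBy (fun a b => decide (b.2 < a.2)) x ys).filter (fun p => p.2 == m)
        = ys.filter (fun p => p.2 == m) ++ (if x.2 == m then [x] else [])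
  | [], hx, _, _ => by simp [PySem.List.insertBy, List.filter_singleton]
  | y :: ys, hx, hall, hsort => by
    show (if (decide (y.2 < x.2)) = true then x :: y :: ys
          else y :: PySem.List.insertBy (fun a b => decide (b.2 < a.2)) x ys).filter
            (fun p => p.2 == m) = _
    by_cases hlt : y.2 < x.2
    · by_cases hxm : x.2 = m
      · have htail : ∀ p ∈ y :: ys, (p.2 == m) = false := by
          intro p hp
          rcases List.mem_cons.1 hp with h | h
          · subst h; simp; omega
          · have := (List.pairwise_cons.1 hsort).1 p h
            simp; omega
        have h1 := htail y List.mem_cons_self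
        have h2 : ys.filter (fun p => p.2 == m) = [] := by
          rw [List.filter_eq_nil_iff]; intro p hp; simp [htail p (List.mem_cons_of_mem _ hp)]
        have hx' : (x.2 == m) = true := by simp [hxm]
        simp [hlt, hx', h1, h2]
      · have hx' : (x.2 == m) = false := by simp [hxm]
        simp [hlt, List.filter_cons, hx']
    · have hd : (decide (y.2 < x.2)) = false := by simp [hlt]
      simp only [hd, Bool.false_eq_true, if_false, List.filter_cons]
      rw [insertBy_filter_max m x ys hx
            (fun p hp => hall p (List.mem_cons_of_mem _ hp))
            (List.pairwise_cons.1 hsort).2]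
      by_cases hy : (y.2 == m) = true
      · simp [hy]
      · simp at hy
        simp [hy]

-- insertBy for a descending sort preserves descending order.
theorem insertBy_pairwise (x : String × Int) :
    ∀ (ys : List (String × Int)), ys.Pairwise (fun a b => b.2 ≤ a.2) →
      (PySem.List.insertBy (fun a b => decide (b.2 < a.2)) x ys).Pairwise (fun a b => b.2 ≤ a.2)
  | [], _ => by simp [PySem.List.insertBy]
  | y :: ys, hsort => by
    show (if (decide (y.2 < x.2)) = true then x :: y :: ys
          else y :: PySem.List.insertBy (fun a b => decide (b.2 < a.2)) x ys).Pairwise _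
    rcases List.pairwise_cons.1 hsort with ⟨hy, hys⟩
    by_cases hlt : y.2 < x.2
    · simp only [decide_eq_true_eq, if_pos hlt]
      refine List.pairwise_cons.2 ⟨?_, hsort⟩
      intro p hp
      rcases List.mem_cons.1 hp with h | h
      · subst h; omega
      · have := hy p h; omega
    · have hd : (decide (y.2 < x.2)) = false := by simp [hlt]
      simp only [hd, Bool.false_eq_true, if_false]
      refine List.pairwise_cons.2 ⟨?_, insertBy_pairwise x ys hys⟩
      intro p hp
      rcases (PySem.List.mem_insertBy _ x p ys).1 hp with h | h
      · subst h; omega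
      · exact hy p h

-- Stability of the descending insertion sort on the maximal entries.
theorem foldl_insertBy_filter_max (m : Int) :
    ∀ (xs acc : List (String × Int)),
      (∀ p ∈ acc, p.2 ≤ m) → acc.Pairwise (fun a b => b.2 ≤ a.2) → (∀ p ∈ xs, p.2 ≤ m) →
      (xs.foldl (fun acc x => PySem.List.insertBy (fun a b => decide (b.2 < a.2)) x acc) acc).filter
          (fun p => p.2 == m)
        = acc.filter (fun p => p.2 == m) ++ xs.filter (fun p => p.2 == m)
  | [], acc, _, _, _ => by simp
  | q :: qs, acc, hacc, hsort, hxs => by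
    simp only [List.foldl_cons]
    have hmem : ∀ p ∈ PySem.List.insertBy (fun a b => decide (b.2 < a.2)) q acc, p.2 ≤ m := by
      intro p hp
      rcases (PySem.List.mem_insertBy _ q p acc).1 hp with h | h
      · rw [h]; exact hxs q List.mem_cons_self
      · exact hacc p h
    rw [foldl_insertBy_filter_max m qs _ hmem
          (insertBy_pairwise q acc hsort)
          (fun p hp => hxs p (List.mem_cons_of_mem _ hp))]
    rw [insertBy_filter_max m q acc (hxs q List.mem_cons_self) hacc hsort]
    by_cases hx : (q.2 == m) = true
    · simp [hx, List.append_assoc]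
    · simp at hx
      simp [hx]

-- With distinct keys, rebuilding the sorted items into a dict is the identity.
theorem dict_ofList_items (l : List (String × Int)) (h : (l.map Prod.fst).Nodup) :
    (PySem.Dict.ofList l).items = l := by
  have : PySem.Dict.ofList l
      = l.foldl (fun d a => d.insert (Prod.fst a) (Prod.snd a)) PySem.Dict.empty := rfl
  rw [this, PySem.Dict.items_foldl_insert_fresh l Prod.fst Prod.snd PySem.Dict.empty
        (by intro a _; exact PySem.Dict.contains_empty _) h]
  simp
  rfl

-- A's running-max loop is the max fold.
theorem if_max_fold (l : List (String × Int)) (b : Int) :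
    l.foldl (fun m p => if p.2 > m then p.2 else m) b = l.foldl (fun m p => max m p.2) b := by
  apply PySem.List.foldl_congr_mem
  intro acc x _
  by_cases h : x.2 > acc
  · simp [if_pos h]; omega
  · simp [if_neg h]; omega

-- ===== VERDICT (by name: the statement is the Claim_ definition above) =====
theorem highest_scoring_students_spec : Claim_equal_highest_scoring_students := by
  intro input _hdom hpre
  unfold Spec_highest_scoring_students
  unfold highest_scoring_students highest_scoring_students_alt
  simp only []
  have hperm : (PySem.List.sorted input (fun item => item.2) true).Perm input :=
    PySem.List.sorted_perm input (fun item => item.2) true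
  have hkeys : ((PySem.List.sorted input (fun item => item.2) true).map Prod.fst).Nodup :=
    ((hperm.map Prod.fst).nodup_iff).2 hpre
  rw [dict_ofList_items _ hkeys]
  rw [if_max_fold]
  have hmaxeq : (PySem.List.sorted input (fun item => item.2) true).foldl (fun m p => max m p.2) 0
      = input.foldl (fun m p => max m p.2) 0 :=
    @List.Perm.foldl_eq _ _ (fun m p => max m p.2) _ _
      ⟨by intro b a c
          show max (max b a.2) c.2 = max (max b c.2) a.2
          rw [max_assoc, max_comm a.2, ← max_assoc]⟩ hperm 0
  rw [hmaxeq]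
  set M := input.foldl (fun m p => max m p.2) 0 with hM
  rw [PySem.List.foldl_append_if (fun p => p.2 == M) Prod.fst]
  rw [alt_fold_char input 0 []]
  simp only [← hM]
  have hall : ∀ p ∈ input, p.2 ≤ M := (PySem.List.le_foldl_max_int input (fun p => p.2) 0).2
  rw [PySem.List.sorted_rev_eq_foldl_insertBy]
  rw [foldl_insertBy_filter_max M input [] (by simp) (by simp) hall]
  simp
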